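-- pv_equiv track=rewrite | github.com/pabdominguez98/tp-1-algoritmos | tp-1-algoritmos/tp-1-algoritmos/etapa_2.py | eliminar_no_letras
-- ===== SOURCE A (Python) =====
-- def eliminar_no_letras(texto) :
--     """
--     Al final la cambíe y hace algo parecido a lo que hace palabras_validas(), pero aparte de sacar los puntos comas y demas,
--     tambn elimina todo lo q no sea una letra y lo reemplaza por un espacio. hay casos en los que hay dos guiones seguidos: "--" y
--     los reemplaza por dos espacios: "  ", eso no genera ningun problema, xq cuando hace split separa las palabras bien, lo probé con un ejemplo
--     en el q incluso hay 5 espacios entre palabra y palabra :)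
--
--     """
--
--     nueva = ''
--     for i in range(len(texto)):
--         if not texto[i].isalpha():
--             nueva += ' '
--         else:
--             nueva += texto[i]
--
--     nueva = nueva.split()
--     return nueva
-- ===== SOURCE B (Python) =====
-- def eliminar_no_letras(texto):
--     palabras = []
--     actual = ''
--     for c in texto:
--         if c.isalpha():
--             actual += c
--         else:
--             if actual:
--                 palabras.append(actual)
--                 actual = ''
--     if actual:
--         palabras.append(actual)
--     return palabras
-- ===== Notes on version B (the rewrite author's own statement) =====
-- stated objective: simpler
-- what changed: Single-pass tokenizer maintaining a current-word buffer and flushing it on each non-letter, instead of building a whole space-masked copy of the string and calling split() on it.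
import Mathlib
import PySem

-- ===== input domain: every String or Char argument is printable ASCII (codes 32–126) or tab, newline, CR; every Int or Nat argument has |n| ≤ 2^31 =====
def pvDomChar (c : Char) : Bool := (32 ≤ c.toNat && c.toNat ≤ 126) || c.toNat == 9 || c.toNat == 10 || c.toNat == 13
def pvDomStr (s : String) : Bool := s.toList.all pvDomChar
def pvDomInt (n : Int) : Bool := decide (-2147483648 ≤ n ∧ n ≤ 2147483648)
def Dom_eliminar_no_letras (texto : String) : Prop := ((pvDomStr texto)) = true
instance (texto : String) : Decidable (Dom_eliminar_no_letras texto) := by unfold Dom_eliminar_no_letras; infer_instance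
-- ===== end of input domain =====

-- B tokenizes in one pass with a current-word buffer instead of masking non-letters
-- to spaces into an intermediate string and calling split() (objective: simpler).

-- ===== PORT A =====
-- A builds `nueva` by appending, for each character, a space if it is not a letter
-- and the character itself otherwise, then splits on whitespace.
def eliminar_no_letras (texto : String) : List String :=
  let nueva : List Char :=
    texto.toList.foldl
      (fun acc c => acc ++ [if PySem.Chars.isalpha c = false then ' ' else c]) []
  (PySem.Chars.split₀ nueva).map String.ofList

-- ===== PORT B =====
-- state = (palabras, actual): finished words, current-word buffer
def eliminar_no_letras_altStep (st : List String × List Char) (c : Char) :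
    List String × List Char :=
  if PySem.Chars.isalpha c then (st.1, st.2 ++ [c])
  else if st.2 = [] then st
  else (st.1 ++ [String.ofList st.2], [])

def eliminar_no_letras_alt (texto : String) : List String :=
  let st := texto.toList.foldl eliminar_no_letras_altStep ([], [])
  if st.2 = [] then st.1 else st.1 ++ [String.ofList st.2]

-- ===== PRECONDITION & SPEC =====
def Spec_eliminar_no_letras (texto : String) (out : List String) : Prop := out = eliminar_no_letras_alt texto
instance (texto : String) (out : List String) : Decidable (Spec_eliminar_no_letras texto out) := by unfold Spec_eliminar_no_letras; infer_instance

-- ===== CLAIM (what is proved, stated in full; the proofs are below) =====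
def Claim_equal_eliminar_no_letras : Prop := ∀ (texto : String), Dom_eliminar_no_letras texto → Spec_eliminar_no_letras texto (eliminar_no_letras texto)

-- ===== LEMMAS AND PROOFS =====

def pvMask (c : Char) : Char := if PySem.Chars.isalpha c = false then ' ' else c

theorem pvFoldl_mask (cs : List Char) (acc : List Char) :
    cs.foldl (fun acc c => acc ++ [if PySem.Chars.isalpha c = false then ' ' else c]) acc
      = acc ++ cs.map pvMask := by
  induction cs generalizing acc with
  | nil => simp
  | cons c cs ih => simp [List.foldl, ih, pvMask]

theorem pvIsspace_of_isalpha (c : Char) (h : PySem.Chars.isalpha c = true) :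
    PySem.Chars.isspace c = false := by
  simp only [PySem.Chars.isalpha, PySem.Chars.isupper, PySem.Chars.islower,
    Bool.or_eq_true, Bool.and_eq_true, decide_eq_true_eq, Char.le_def] at h
  simp only [PySem.Chars.isspace, Bool.or_eq_false_iff, Bool.and_eq_false_iff,
    decide_eq_false_iff_not]
  have h65 : ('A' : Char).toNat = 65 := by decide
  have h90 : ('Z' : Char).toNat = 90 := by decide
  have h97 : ('a' : Char).toNat = 97 := by decide
  have h122 : ('z' : Char).toNat = 122 := by decide
  rcases h with ⟨h1, h2⟩ | ⟨h1, h2⟩ <;>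
    [(have l1 : 65 ≤ c.toNat := h65 ▸ Nat.le_of_lt_succ (Nat.lt_succ_of_le h1);
      have l2 : c.toNat ≤ 90 := h90 ▸ h2);
     (have l1 : 97 ≤ c.toNat := h97 ▸ h1;
      have l2 : c.toNat ≤ 122 := h122 ▸ h2)] <;>
  · refine ⟨⟨⟨⟨⟨⟨⟨⟨⟨⟨⟨?_, ?_⟩, ?_⟩, ?_⟩, ?_⟩, ?_⟩, ?_⟩, ?_⟩, ?_⟩, ?_⟩, ?_⟩, ?_⟩ <;> omega

-- the invariant linking split₀'s worker to B's buffer fold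
theorem pvMain (cs : List Char) (cur : List Char) (acc : List (List Char)) :
    (PySem.Chars.split₀.go (cs.map pvMask) cur acc).map String.ofList
      = (fun st : List String × List Char =>
          if st.2 = [] then st.1 else st.1 ++ [String.ofList st.2])
          (cs.foldl eliminar_no_letras_altStep
            ((acc.reverse.map String.ofList), cur.reverse)) := by
  induction cs generalizing cur acc with
  | nil =>
    simp only [List.map_nil, PySem.Chars.split₀.go, List.foldl_nil]
    by_cases h : cur = []
    · simp [h]
    · simp [h, List.isEmpty_iff, List.reverse_eq_nil_iff]
  | cons c cs ih =>
    by_cases ha : PySem.Chars.isalpha c = true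
    · have hs : PySem.Chars.isspace c = false := pvIsspace_of_isalpha c ha
      have hm : pvMask c = c := by simp [pvMask, ha]
      have h2 := ih (c :: cur) acc
      simp only [List.reverse_cons] at h2
      simp [PySem.Chars.split₀.go, hm, hs, eliminar_no_letras_altStep, ha, h2]
    · have hm : pvMask c = ' ' := by simp [pvMask, ha]
      have hs : PySem.Chars.isspace (pvMask c) = true := by rw [hm]; decide
      rw [Bool.not_eq_true] at ha
      by_cases hc : cur = []
      · subst hc
        have h2 := ih [] acc
        simp only [List.reverse_nil] at h2
        simp [PySem.Chars.split₀.go, hs, eliminar_no_letras_altStep, ha, h2]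
      · have h2 := ih [] (cur.reverse :: acc)
        simp only [List.reverse_nil, List.reverse_cons, List.map_append,
          List.map_cons, List.map_nil] at h2
        simp [PySem.Chars.split₀.go, hs, eliminar_no_letras_altStep, ha, hc,
          List.isEmpty_iff, List.reverse_eq_nil_iff, h2]
    
-- ===== VERDICT (by name: the statement is the Claim_ definition above) =====
theorem eliminar_no_letras_spec : Claim_equal_eliminar_no_letras := by
  intro texto _
  unfold Spec_eliminar_no_letras eliminar_no_letras eliminar_no_letras_alt
  simp only [pvFoldl_mask, List.nil_append, PySem.Chars.split₀]
  simpa using pvMain texto.toList [] []
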